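-- pv_equiv track=rewrite | github.com/masterzenith/code-pattern-practice | find_embedded_word.py | find_embedded_word
-- ===== SOURCE A (Python) =====
-- import string
--
-- def find_embedded_word(words, s) -> string:
--     flag = False
--     for word in words:
--         for char in word:
--             if char in s and word.count(char) <= s.count(char):
--                 flag = True
--             else:
--                 flag = False
--                 break
--         if flag:
--             return word
--     return None
-- ===== SOURCE B (Python) =====
-- def find_embedded_word(words, s):
--     # consume-the-pool strategy: try to remove each letter of the word from a
--     # copy of s; the first word whose letters all come out of the pool wins.
--     for word in words:
--         if not word:
--             continue  # A never returns the empty word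
--         pool = list(s)
--         ok = True
--         for c in word:
--             if c in pool:
--                 pool.remove(c)
--             else:
--                 ok = False
--                 break
--         if ok:
--             return word
--     return None
-- ===== Notes on version B (the rewrite author's own statement) =====
-- stated objective: alternative
-- what changed: Replaces A's per-character membership-and-full-count test with a consume-from-a-pool strategy: each candidate word removes its letters one by one from a fresh copy of s, succeeding iff every letter could be removed (empty words are skipped, matching A's never returning them).
import Mathlib
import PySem

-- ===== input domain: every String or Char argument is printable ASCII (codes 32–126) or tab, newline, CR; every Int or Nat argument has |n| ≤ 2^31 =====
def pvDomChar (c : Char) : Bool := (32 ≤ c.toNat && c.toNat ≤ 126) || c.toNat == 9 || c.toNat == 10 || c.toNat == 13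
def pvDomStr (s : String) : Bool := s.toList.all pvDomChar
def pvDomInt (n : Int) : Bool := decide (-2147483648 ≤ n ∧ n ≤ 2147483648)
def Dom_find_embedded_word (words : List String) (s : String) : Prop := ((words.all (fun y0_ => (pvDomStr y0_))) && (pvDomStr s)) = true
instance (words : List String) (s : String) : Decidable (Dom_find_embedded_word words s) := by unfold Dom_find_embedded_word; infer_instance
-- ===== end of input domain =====

-- B replaces A's per-character membership-and-count test by consuming each word's
-- letters from a pool copied from s (alternative decomposition, same cost).


-- ===== PORT A =====
-- `char in s and word.count(char) <= s.count(char)`; iterating a Python str yields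
-- 1-character strings, so the needle of `in`/`count` is the singleton [c].
def pvCondA (w s : List Char) (c : Char) : Bool :=
  PySem.Chars.isIn [c] s && decide (PySem.Chars.count w [c] ≤ PySem.Chars.count s [c])

-- the inner `for char in word` loop, threading `flag` (break returns the final flag = false)
def pvInnerA (w s : List Char) : List Char → Bool → Bool
  | [], flag => flag
  | c :: cs, _flag => if pvCondA w s c then pvInnerA w s cs true else false

-- A's `flag` is set to False once before the loop and is False again whenever an
-- iteration finishes without returning, so each word's inner loop starts with `false`.
def find_embedded_word : List String → String → Option String
  | [], _ => none
  | w :: ws, s =>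
      if pvInnerA w.toList s.toList w.toList false then some w
      else find_embedded_word ws s

-- ===== PORT B =====
-- `pool.remove(c)` fires only under the guard `c in pool`, where it is
-- List.erase (PySem.List.remove?_eq_some_erase)
def pvConsume : List Char → List Char → Bool
  | [], _ => true
  | c :: cs, pool => if c ∈ pool then pvConsume cs (pool.erase c) else false

def find_embedded_word_alt : List String → String → Option String
  | [], _ => none
  | w :: ws, s =>
      if w.toList = [] then find_embedded_word_alt ws s
      else if pvConsume w.toList s.toList then some w
      else find_embedded_word_alt ws s

-- ===== PRECONDITION & SPEC =====
def Spec_find_embedded_word (words : List String) (s : String) (out : Option String) : Prop := out = find_embedded_word_alt words s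
instance (words : List String) (s : String) (out : Option String) : Decidable (Spec_find_embedded_word words s out) := by unfold Spec_find_embedded_word; infer_instance

-- ===== CLAIM (what is proved, stated in full; the proofs are below) =====
def Claim_equal_find_embedded_word : Prop := ∀ (words : List String) (s : String), Dom_find_embedded_word words s → Spec_find_embedded_word words s (find_embedded_word words s)

-- ===== LEMMAS AND PROOFS =====

-- Chars.count with a singleton needle is plain character count
lemma pv_count_go_singleton (c : Char) :
    ∀ (fuel : Nat) (l : List Char) (acc : Nat), l.length ≤ fuel →
      PySem.Chars.count.go [c] fuel l acc = acc + l.count c := by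
  intro fuel
  induction fuel with
  | zero =>
      intro l acc h
      have : l = [] := List.length_eq_zero_iff.mp (Nat.le_zero.mp h)
      subst this; simp [PySem.Chars.count.go]
  | succ n ih =>
      intro l acc h
      cases l with
      | nil => simp [PySem.Chars.count.go]
      | cons x t =>
          rw [show PySem.Chars.count.go [c] (n+1) (x::t) acc =
                if [c].isPrefixOf (x::t) then PySem.Chars.count.go [c] n t (acc+1)
                else PySem.Chars.count.go [c] n t acc from rfl]
          have ht : t.length ≤ n := by simpa using h
          by_cases hx : c = x
          · subst hx
            rw [if_pos (by simp [List.isPrefixOf]), ih t (acc+1) ht, List.count_cons]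
            simp; omega
          · rw [if_neg (by simp [List.isPrefixOf, hx]), ih t acc ht, List.count_cons]
            have : ¬ x = c := fun hxc => hx hxc.symm
            simp [this]

lemma pv_count_singleton (l : List Char) (c : Char) :
    PySem.Chars.count l [c] = l.count c := by
  simp [PySem.Chars.count, pv_count_go_singleton c l.length l 0 le_rfl]

lemma pv_isIn_singleton (l : List Char) (c : Char) :
    PySem.Chars.isIn [c] l = true ↔ c ∈ l := by
  rw [PySem.Chars.isIn_iff_infix]; exact List.singleton_infix_iff c l

lemma pv_consume_iff : ∀ (cs pool : List Char),
    pvConsume cs pool = true ↔ ∀ c, cs.count c ≤ pool.count c := by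
  intro cs
  induction cs with
  | nil => intro pool; simp [pvConsume]
  | cons c cs ih =>
      intro pool
      simp only [pvConsume]
      by_cases hc : c ∈ pool
      · rw [if_pos hc, ih]
        have hcp : 0 < pool.count c := List.count_pos_iff.mpr hc
        constructor
        · intro h d
          have hd := h d
          rw [List.count_erase] at hd
          rw [List.count_cons]
          rcases eq_or_ne c d with rfl | hne
          · simp only [beq_self_eq_true, if_true] at hd ⊢; omega
          · simp only [beq_iff_eq, hne, if_false] at hd ⊢; omega
        · intro h d
          have hd := h d
          rw [List.count_cons] at hd
          rw [List.count_erase]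
          rcases eq_or_ne c d with rfl | hne
          · simp only [beq_self_eq_true, if_true] at hd ⊢; omega
          · simp only [beq_iff_eq, hne, if_false] at hd ⊢; omega
      · rw [if_neg hc]
        refine ⟨fun h => absurd h (by simp), fun h => ?_⟩
        have h1 := h c
        rw [List.count_cons] at h1
        simp only [beq_self_eq_true, if_true] at h1
        exact absurd (List.count_pos_iff.mp (by omega)) hc

lemma pv_innerA_true_iff (w s : List Char) : ∀ cs,
    pvInnerA w s cs true = true ↔ ∀ c ∈ cs, pvCondA w s c = true := by
  intro cs
  induction cs with
  | nil => simp [pvInnerA]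
  | cons c cs ih =>
      simp only [pvInnerA]
      by_cases h : pvCondA w s c = true
      · rw [if_pos h, ih]; simp [h]
      · rw [if_neg h]; simp [h]

-- the word-level check: A's counting test equals B's pool consumption (nonempty word)
lemma pv_word_eq (w s : List Char) (hw : w ≠ []) :
    pvInnerA w s w false = pvConsume w s := by
  have key : pvInnerA w s w false = true ↔ pvConsume w s = true := by
    have hflag : pvInnerA w s w false = pvInnerA w s w true := by
      cases w with
      | nil => exact absurd rfl hw
      | cons c cs => rfl
    rw [hflag, pv_innerA_true_iff, pv_consume_iff]
    constructor
    · intro h c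
      by_cases hcw : c ∈ w
      · have := h c hcw
        simp only [pvCondA, Bool.and_eq_true, decide_eq_true_eq,
          pv_count_singleton] at this
        exact this.2
      · rw [List.count_eq_zero_of_not_mem hcw]; omega
    · intro h c hcw
      simp only [pvCondA, Bool.and_eq_true, decide_eq_true_eq, pv_count_singleton]
      refine ⟨(pv_isIn_singleton s c).mpr ?_, h c⟩
      have h1 : 0 < w.count c := List.count_pos_iff.mpr hcw
      have := h c
      exact List.count_pos_iff.mp (by omega)
  cases ha : pvInnerA w s w false <;> cases hb : pvConsume w s <;>
    simp_all

lemma pv_main_eq : ∀ (words : List String) (s : String),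
    find_embedded_word words s = find_embedded_word_alt words s := by
  intro words s
  induction words with
  | nil => rfl
  | cons w ws ih =>
      simp only [find_embedded_word, find_embedded_word_alt]
      by_cases hw : w.toList = []
      · rw [if_pos hw, hw]
        simp only [pvInnerA, if_neg (by simp : ¬ (false = true))]
        exact ih
      · rw [if_neg hw, pv_word_eq w.toList s.toList hw]
        by_cases hc : pvConsume w.toList s.toList = true
        · rw [if_pos hc, if_pos hc]
        · rw [if_neg hc, if_neg hc]; exact ih

-- ===== VERDICT (by name: the statement is the Claim_ definition above) =====
theorem find_embedded_word_spec : Claim_equal_find_embedded_word :=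
  fun words s _ => pv_main_eq words s
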